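-- pv_equiv track=rewrite | github.com/ostmax/Bitcoin-news-bot | bitcoin_news_bot.py | analyze_price_impact
-- ===== SOURCE A (Python) =====
-- def analyze_price_impact(title: str, summary: str) -> str:
--     """Анализ потенциального влияния новости на цену биткоина"""
--     text = f"{title} {summary}".lower()
--
--     # Сильные позитивные сигналы
--     strong_positive = {
--         'approval', 'approved', 'adoption', 'institutional', 'etf approved',
--         'breakthrough', 'rally', 'surge', 'bullish', 'partnership',
--         'integration', 'all time high', 'record high', 'adopted',
--         'halving', 'institutional adoption', 'mass adoption'
--     }
--
--     # Умеренные позитивные сигналы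
--     moderate_positive = {
--         'positive', 'growth', 'expansion', 'development', 'progress',
--         'innovation', 'upgrade', 'improvement', 'partnership', 'uptrend'
--     }
--
--     # Сильные негативные сигналы
--     strong_negative = {
--         'ban', 'banned', 'rejection', 'rejected', 'regulation', 'crackdown',
--         'lawsuit', 'investigation', 'hack', 'exploit', 'crash', 'plunge',
--         'selloff', 'fraud', 'scam', 'security breach', 'market crash'
--     }
--
--     # Умеренные негативные сигналы
--     moderate_negative = {
--         'delay', 'warning', 'concern', 'risk', 'volatility', 'uncertainty',
--         'correction', 'resistance', 'pressure', 'downtrend', 'bearish'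
--     }
--
--     # Нейтральные/технические
--     neutral = {
--         'analysis', 'report', 'update', 'announcement', 'news',
--         'development', 'feature', 'technical', 'maintenance'
--     }
--
--     # Подсчет баллов
--     positive_score = sum(1 for word in strong_positive if word in text) * 2
--     positive_score += sum(1 for word in moderate_positive if word in text)
--
--     negative_score = sum(1 for word in strong_negative if word in text) * 2
--     negative_score += sum(1 for word in moderate_negative if word in text)
--
--     # Определение влияния
--     if positive_score > negative_score:
--         if positive_score >= 3:
--             return "📈 Сильное влияние | Прогноз: +3-7%"
--         else:
--             return "📈 Умеренное влияние | Прогноз: +1-3%"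
--     elif negative_score > positive_score:
--         if negative_score >= 3:
--             return "📉 Сильное влияние | Прогноз: -3-7%"
--         else:
--             return "📉 Умеренное влияние | Прогноз: -1-3%"
--     else:
--         return "➡️ Минимальное влияние | Прогноз: ±1%"
-- ===== SOURCE B (Python) =====
-- # Text-position-driven matcher: scan the text once by start position; a first-letter
-- # bucket index narrows the candidate phrases at each position; each phrase is marked
-- # once in a matched set and both scores accumulate in the same pass
-- # ('partnership' carries its combined weight 3).
-- _WEIGHTS = {
--     'approval': (2, 0), 'approved': (2, 0), 'adoption': (2, 0),
--     'institutional': (2, 0), 'etf approved': (2, 0), 'breakthrough': (2, 0),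
--     'rally': (2, 0), 'surge': (2, 0), 'bullish': (2, 0),
--     'partnership': (3, 0),  # strong (2) + moderate (1)
--     'integration': (2, 0), 'all time high': (2, 0), 'record high': (2, 0),
--     'adopted': (2, 0), 'halving': (2, 0), 'institutional adoption': (2, 0),
--     'mass adoption': (2, 0),
--     'positive': (1, 0), 'growth': (1, 0), 'expansion': (1, 0),
--     'development': (1, 0), 'progress': (1, 0), 'innovation': (1, 0),
--     'upgrade': (1, 0), 'improvement': (1, 0), 'uptrend': (1, 0),
--     'ban': (0, 2), 'banned': (0, 2), 'rejection': (0, 2), 'rejected': (0, 2),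
--     'regulation': (0, 2), 'crackdown': (0, 2), 'lawsuit': (0, 2),
--     'investigation': (0, 2), 'hack': (0, 2), 'exploit': (0, 2),
--     'crash': (0, 2), 'plunge': (0, 2), 'selloff': (0, 2), 'fraud': (0, 2),
--     'scam': (0, 2), 'security breach': (0, 2), 'market crash': (0, 2),
--     'delay': (0, 1), 'warning': (0, 1), 'concern': (0, 1), 'risk': (0, 1),
--     'volatility': (0, 1), 'uncertainty': (0, 1), 'correction': (0, 1),
--     'resistance': (0, 1), 'pressure': (0, 1), 'downtrend': (0, 1),
--     'bearish': (0, 1),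
-- }
-- # bucket index: first character -> entries starting with it
-- _BYFIRST = {}
-- for _phrase, (_pw, _nw) in _WEIGHTS.items():
--     _BYFIRST.setdefault(_phrase[0], []).append((_phrase, _pw, _nw))
--
--
-- def analyze_price_impact(title: str, summary: str) -> str:
--     text = (title + " " + summary).lower()
--     matched = set()
--     positive_score = 0
--     negative_score = 0
--     for i in range(len(text)):
--         for phrase, pw, nw in _BYFIRST.get(text[i], ()):
--             if phrase not in matched and text.startswith(phrase, i):
--                 matched.add(phrase)
--                 positive_score += pw
--                 negative_score += nw
--     if positive_score > negative_score:
--         if positive_score >= 3: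
--             return "📈 Сильное влияние | Прогноз: +3-7%"
--         return "📈 Умеренное влияние | Прогноз: +1-3%"
--     if negative_score > positive_score:
--         if negative_score >= 3:
--             return "📉 Сильное влияние | Прогноз: -3-7%"
--         return "📉 Умеренное влияние | Прогноз: -1-3%"
--     return "➡️ Минимальное влияние | Прогноз: ±1%"
-- ===== Notes on version B (the rewrite author's own statement) =====
-- stated objective: alternative
-- what changed: B replaces A's phrase-driven 'word in text' counting comprehensions by a text-driven scan: one pass over the start positions of the text, a first-letter bucket index selecting the candidate phrases of a single merged weight table at each position ('partnership' carries the combined weight 3), each phrase marked once in a matched set while both scores accumulate in the same pass.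
import Mathlib
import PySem

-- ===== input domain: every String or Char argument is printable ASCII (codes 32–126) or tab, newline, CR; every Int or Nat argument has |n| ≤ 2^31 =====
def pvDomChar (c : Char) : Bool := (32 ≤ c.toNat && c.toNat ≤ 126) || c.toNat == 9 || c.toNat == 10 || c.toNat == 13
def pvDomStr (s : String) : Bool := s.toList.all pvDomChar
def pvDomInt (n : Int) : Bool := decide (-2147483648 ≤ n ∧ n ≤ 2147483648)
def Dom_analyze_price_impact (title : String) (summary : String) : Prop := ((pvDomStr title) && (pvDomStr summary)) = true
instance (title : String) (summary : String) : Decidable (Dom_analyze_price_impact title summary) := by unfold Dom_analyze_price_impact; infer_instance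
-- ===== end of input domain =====

-- B replaces A's phrase-driven 'word in text' counting comprehensions by a text-driven
-- scan over the start positions with a first-letter bucket index over one merged weight
-- table, marking each phrase once in a matched set and accumulating both scores in the
-- same pass (alternative).

-- ===== PORT A =====
def strongPositiveA : List String :=
  ["approval", "approved", "adoption", "institutional", "etf approved",
   "breakthrough", "rally", "surge", "bullish", "partnership",
   "integration", "all time high", "record high", "adopted",
   "halving", "institutional adoption", "mass adoption"]

def moderatePositiveA : List String :=
  ["positive", "growth", "expansion", "development", "progress",
   "innovation", "upgrade", "improvement", "partnership", "uptrend"]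

def strongNegativeA : List String :=
  ["ban", "banned", "rejection", "rejected", "regulation", "crackdown",
   "lawsuit", "investigation", "hack", "exploit", "crash", "plunge",
   "selloff", "fraud", "scam", "security breach", "market crash"]

def moderateNegativeA : List String :=
  ["delay", "warning", "concern", "risk", "volatility", "uncertainty",
   "correction", "resistance", "pressure", "downtrend", "bearish"]

def analyze_price_impact (title : String) (summary : String) : String :=
  let text := PySem.Str.lower (title ++ " " ++ summary)
  let positive_score : Int :=
    (strongPositiveA.countP (fun w => PySem.Str.isIn w text) : Int) * 2
      + (moderatePositiveA.countP (fun w => PySem.Str.isIn w text) : Int)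
  let negative_score : Int :=
    (strongNegativeA.countP (fun w => PySem.Str.isIn w text) : Int) * 2
      + (moderateNegativeA.countP (fun w => PySem.Str.isIn w text) : Int)
  if positive_score > negative_score then
    if positive_score ≥ 3 then "📈 Сильное влияние | Прогноз: +3-7%"
    else "📈 Умеренное влияние | Прогноз: +1-3%"
  else if negative_score > positive_score then
    if negative_score ≥ 3 then "📉 Сильное влияние | Прогноз: -3-7%"
    else "📉 Умеренное влияние | Прогноз: -1-3%"
  else "➡️ Минимальное влияние | Прогноз: ±1%"

-- ===== PORT B =====
-- the merged weight dict of Source B, as an association list (insertion order): phrase ↦ (pw, nw)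
def pvWeights : List (String × Int × Int) :=
  [("approval", 2, 0), ("approved", 2, 0), ("adoption", 2, 0),
   ("institutional", 2, 0), ("etf approved", 2, 0), ("breakthrough", 2, 0),
   ("rally", 2, 0), ("surge", 2, 0), ("bullish", 2, 0),
   ("partnership", 3, 0),
   ("integration", 2, 0), ("all time high", 2, 0), ("record high", 2, 0),
   ("adopted", 2, 0), ("halving", 2, 0), ("institutional adoption", 2, 0),
   ("mass adoption", 2, 0),
   ("positive", 1, 0), ("growth", 1, 0), ("expansion", 1, 0),
   ("development", 1, 0), ("progress", 1, 0), ("innovation", 1, 0),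
   ("upgrade", 1, 0), ("improvement", 1, 0), ("uptrend", 1, 0),
   ("ban", 0, 2), ("banned", 0, 2), ("rejection", 0, 2), ("rejected", 0, 2),
   ("regulation", 0, 2), ("crackdown", 0, 2), ("lawsuit", 0, 2),
   ("investigation", 0, 2), ("hack", 0, 2), ("exploit", 0, 2),
   ("crash", 0, 2), ("plunge", 0, 2), ("selloff", 0, 2), ("fraud", 0, 2),
   ("scam", 0, 2), ("security breach", 0, 2), ("market crash", 0, 2),
   ("delay", 0, 1), ("warning", 0, 1), ("concern", 0, 1), ("risk", 0, 1),
   ("volatility", 0, 1), ("uncertainty", 0, 1), ("correction", 0, 1),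
   ("resistance", 0, 1), ("pressure", 0, 1), ("downtrend", 0, 1),
   ("bearish", 0, 1)]

def pvHead (s : String) : Char := s.toList.headD ' '
-- ^ phrase[0] of Source B's bucket builder; exact here: every phrase of the table is nonempty

def pvCharAt (text : String) (i : Int) : Char := (PySem.Str.pyGet? text i).getD ' '
-- ^ text[i]; exact for 0 ≤ i < len(text), the only indices the loop below visits

-- _BYFIRST: first character -> entries starting with it (insertion-ordered dict)
def pvByFirst : PySem.Dict Char (List (String × Int × Int)) :=
  pvWeights.foldl
    (fun d e => PySem.Dict.modify d (pvHead e.1) [] (fun l => l ++ [e]))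
    PySem.Dict.empty

def analyze_price_impact_alt (title : String) (summary : String) : String :=
  let text := PySem.Str.lower (title ++ " " ++ summary)
  -- for i in range(len(text)): for phrase,pw,nw in _BYFIRST.get(text[i], ()): …
  -- text.startswith(phrase, i) is ported as startswith on the slice text[i:], which is
  -- exact here: for 0 ≤ i, CPython's s.startswith(p, i) equals s[i:].startswith(p)
  let st :=
    (PySem.List.pyRange 0 (PySem.Str.len text) 1).foldl
      (fun st i =>
        (PySem.Dict.getD pvByFirst (pvCharAt text i) []).foldl
          (fun st e =>
            if !(PySem.Set.contains st.1 e.1)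
                && PySem.Str.startswith (PySem.Str.slice text (some i) none) e.1 then
              (PySem.Set.add st.1 e.1, st.2.1 + e.2.1, st.2.2 + e.2.2)
            else st)
          st)
      (((PySem.Set.empty : PySem.Set String), (0 : Int), (0 : Int)))
  let positive_score := st.2.1
  let negative_score := st.2.2
  if positive_score > negative_score then
    if positive_score ≥ 3 then "📈 Сильное влияние | Прогноз: +3-7%"
    else "📈 Умеренное влияние | Прогноз: +1-3%"
  else if negative_score > positive_score then
    if negative_score ≥ 3 then "📉 Сильное влияние | Прогноз: -3-7%"
    else "📉 Умеренное влияние | Прогноз: -1-3%"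
  else "➡️ Минимальное влияние | Прогноз: ±1%"

-- ===== PRECONDITION & SPEC =====
def Spec_analyze_price_impact (title : String) (summary : String) (out : String) : Prop := out = analyze_price_impact_alt title summary
instance (title : String) (summary : String) (out : String) : Decidable (Spec_analyze_price_impact title summary out) := by unfold Spec_analyze_price_impact; infer_instance

-- ===== CLAIM (what is proved, stated in full; the proofs are below) =====
def Claim_equal_analyze_price_impact : Prop := ∀ (title : String) (summary : String), Dom_analyze_price_impact title summary → Spec_analyze_price_impact title summary (analyze_price_impact title summary)

-- ===== LEMMAS AND PROOFS =====

-- the body of B's inner loop, abstracted over the per-position match test q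
def pvStep (q : String → Bool) (st : List String × Int × Int) (e : String × Int × Int) :
    List String × Int × Int :=
  if !(PySem.Set.contains st.1 e.1) && q e.1 then
    (PySem.Set.add st.1 e.1, st.2.1 + e.2.1, st.2.2 + e.2.2)
  else st

-- does phrase p start at position j of text (Source B's 'text[i:].startswith(phrase)')
def pvHit (text : String) (j : Nat) (p : String) : Bool :=
  PySem.Str.startswith (PySem.Str.slice text (some (j : Int)) none) p

-- weight mass of the matched set m
def pvSum (f : String × Int × Int → Int) (L : List (String × Int × Int)) (m : List String) : Int :=
  (L.map (fun e => if e.1 ∈ m then f e else 0)).sum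

lemma pvKeysNodup : (pvWeights.map (fun e => e.1)).Nodup := by decide

lemma pvSum_append_not_mem (f : String × Int × Int → Int) (L : List (String × Int × Int))
    (x : String) (m : List String) (hx : x ∉ L.map (fun e => e.1)) :
    pvSum f L (m ++ [x]) = pvSum f L m := by
  induction L with
  | nil => rfl
  | cons a t ih =>
    simp only [List.map_cons, List.mem_cons, not_or] at hx
    simp only [pvSum, List.map_cons, List.sum_cons] at *
    rw [ih hx.2]
    have : (a.1 ∈ m ++ [x]) ↔ a.1 ∈ m := by
      simp only [List.mem_append, List.mem_singleton, or_iff_left_iff_imp]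
      intro h; exact absurd h.symm hx.1
    rw [if_congr this rfl rfl]

lemma pvSum_add (f : String × Int × Int → Int) (L : List (String × Int × Int))
    (hnd : (L.map (fun e => e.1)).Nodup) (e : String × Int × Int) (he : e ∈ L)
    (m : List String) (hm : e.1 ∉ m) :
    pvSum f L (m ++ [e.1]) = pvSum f L m + f e := by
  induction L with
  | nil => cases he
  | cons a t ih =>
    simp only [List.map_cons, List.nodup_cons] at hnd
    rcases List.mem_cons.mp he with rfl | het
    · simp only [pvSum, List.map_cons, List.sum_cons]
      have h1 : e.1 ∈ m ++ [e.1] := List.mem_append_right _ (List.mem_singleton_self _)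
      rw [if_pos h1, if_neg hm]
      have := pvSum_append_not_mem f t e.1 m hnd.1
      simp only [pvSum] at this
      rw [this]; ring
    · have hne : a.1 ≠ e.1 := by
        intro h; exact hnd.1 (h ▸ List.mem_map_of_mem het)
      simp only [pvSum, List.map_cons, List.sum_cons]
      have hc : (a.1 ∈ m ++ [e.1]) ↔ a.1 ∈ m := by
        simp [List.mem_append, hne]
      rw [if_congr hc rfl rfl]
      have := ih hnd.2 het
      simp only [pvSum] at this
      rw [this]; ring

lemma pvSum_nil (f : String × Int × Int → Int) (L : List (String × Int × Int)) :
    pvSum f L [] = 0 := by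
  induction L with
  | nil => rfl
  | cons a t ih =>
    simp only [pvSum, List.map_cons, List.sum_cons, List.not_mem_nil, if_false] at *
    simp

lemma pvInner (q : String → Bool) (L : List (String × Int × Int)) (hL : L.Sublist pvWeights) :
    ∀ (m : List String) (p n : Int), m.Nodup →
      p = pvSum (fun e => e.2.1) pvWeights m → n = pvSum (fun e => e.2.2) pvWeights m →
      (L.foldl (pvStep q) (m, p, n)).1.Nodup ∧
      (∀ y, y ∈ (L.foldl (pvStep q) (m, p, n)).1 ↔
        y ∈ m ∨ ∃ e ∈ L, e.1 = y ∧ q e.1 = true) ∧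
      (L.foldl (pvStep q) (m, p, n)).2.1
        = pvSum (fun e => e.2.1) pvWeights (L.foldl (pvStep q) (m, p, n)).1 ∧
      (L.foldl (pvStep q) (m, p, n)).2.2
        = pvSum (fun e => e.2.2) pvWeights (L.foldl (pvStep q) (m, p, n)).1 := by
  induction L with
  | nil =>
    intro m p n hm hp hn
    refine ⟨hm, ?_, hp, hn⟩
    simp
  | cons a t ih =>
    intro m p n hm hp hn
    have ht : t.Sublist pvWeights := List.sublist_of_cons_sublist hL
    have haW : a ∈ pvWeights := hL.subset (List.mem_cons_self)
    rw [List.foldl_cons]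
    by_cases hcond : (!(PySem.Set.contains m a.1) && q a.1) = true
    · have hparts := (Bool.and_eq_true _ _).mp hcond
      have hq : q a.1 = true := hparts.2
      have hnm : a.1 ∉ m := by
        have h2 := hparts.1
        simp only [Bool.not_eq_true'] at h2
        simp [PySem.Set.contains] at h2
        exact h2
      have hstep : pvStep q (m, p, n) a = (m ++ [a.1], p + a.2.1, n + a.2.2) := by
        simp only [pvStep, hcond, if_true, PySem.Set.add_of_not_mem hnm]
      rw [hstep]
      have hm' : (m ++ [a.1]).Nodup := by
        simp only [List.nodup_append]
        refine ⟨hm, List.nodup_singleton _, ?_⟩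
        intro z hz b hb
        rw [List.mem_singleton] at hb
        subst hb
        intro h
        exact hnm (h ▸ hz)
      have hp' : p + a.2.1 = pvSum (fun e => e.2.1) pvWeights (m ++ [a.1]) := by
        rw [pvSum_add _ _ pvKeysNodup a haW m hnm, ← hp]
      have hn' : n + a.2.2 = pvSum (fun e => e.2.2) pvWeights (m ++ [a.1]) := by
        rw [pvSum_add _ _ pvKeysNodup a haW m hnm, ← hn]
      obtain ⟨h1, h2, h3, h4⟩ := ih ht (m ++ [a.1]) _ _ hm' hp' hn'
      refine ⟨h1, ?_, h3, h4⟩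
      intro y
      rw [h2 y]
      simp only [List.mem_append, List.mem_cons, List.not_mem_nil, or_false]
      constructor
      · rintro ((hy | rfl) | ⟨e, het, rfl, hqe⟩)
        · exact Or.inl hy
        · exact Or.inr ⟨a, Or.inl rfl, rfl, hq⟩
        · exact Or.inr ⟨e, Or.inr het, rfl, hqe⟩
      · rintro (hy | ⟨e, (rfl | het), rfl, hqe⟩)
        · exact Or.inl (Or.inl hy)
        · exact Or.inl (Or.inr rfl)
        · exact Or.inr ⟨e, het, rfl, hqe⟩
    · have hstep : pvStep q (m, p, n) a = (m, p, n) := by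
        simp only [pvStep, hcond]; rfl
      rw [hstep]
      obtain ⟨h1, h2, h3, h4⟩ := ih ht m p n hm hp hn
      refine ⟨h1, ?_, h3, h4⟩
      intro y
      rw [h2 y]
      have habs : a.1 ∈ m ∨ q a.1 = false := by
        by_cases hmem : a.1 ∈ m
        · exact Or.inl hmem
        · by_cases hq2 : q a.1 = true
          · exfalso; apply hcond
            have hc : PySem.Set.contains m a.1 = false := by
              simp [PySem.Set.contains]; exact hmem
            rw [hc, hq2]; rfl
          · exact Or.inr (Bool.eq_false_iff.mpr hq2)
      simp only [List.mem_cons]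
      constructor
      · rintro (hy | ⟨e, het, rfl, hqe⟩)
        · exact Or.inl hy
        · exact Or.inr ⟨e, Or.inr het, rfl, hqe⟩
      · rintro (hy | ⟨e, (rfl | het), rfl, hqe⟩)
        · exact Or.inl hy
        · rcases habs with hmem | hqf
          · exact Or.inl hmem
          · rw [hqe] at hqf; cases hqf
        · exact Or.inr ⟨e, het, rfl, hqe⟩

-- candidate entries at position j: the first-letter bucket of text[j]
def pvPos (text : String) (j : Nat) : List (String × Int × Int) :=
  pvWeights.filter (fun e => pvHead e.1 == pvCharAt text (j : Int))

lemma pvBuild (L : List (String × Int × Int))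
    (d : PySem.Dict Char (List (String × Int × Int))) (c : Char) :
    PySem.Dict.getD
        (L.foldl (fun d e => PySem.Dict.modify d (pvHead e.1) [] (fun l => l ++ [e])) d) c []
      = PySem.Dict.getD d c [] ++ L.filter (fun e => pvHead e.1 == c) := by
  induction L generalizing d with
  | nil => simp
  | cons a t ih =>
    rw [List.foldl_cons, ih, List.filter_cons]
    by_cases hc : pvHead a.1 = c
    · subst hc
      rw [PySem.Dict.getD_modify_self]
      simp
    · rw [PySem.Dict.getD_modify_of_ne _ _ _ (Ne.symm hc)]
      have : (pvHead a.1 == c) = false := by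
        simp [hc]
      rw [this]
      simp

lemma pvBucket (c : Char) :
    PySem.Dict.getD pvByFirst c [] = pvWeights.filter (fun e => pvHead e.1 == c) := by
  rw [pvByFirst, pvBuild]
  simp

set_option maxRecDepth 8000 in
set_option maxHeartbeats 2000000 in
lemma pvOuter (text : String) (k : Nat) :
    ((List.range k).foldl (fun st j => (pvPos text j).foldl (pvStep (pvHit text j)) st)
        (([] : List String), (0 : Int), (0 : Int))).1.Nodup ∧
    (∀ y, y ∈ ((List.range k).foldl (fun st j => (pvPos text j).foldl (pvStep (pvHit text j)) st)
        (([] : List String), (0 : Int), (0 : Int))).1 ↔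
      ∃ e ∈ pvWeights, e.1 = y ∧
        ∃ j < k, (pvHead e.1 == pvCharAt text (j : Int)) = true ∧ pvHit text j e.1 = true) ∧
    ((List.range k).foldl (fun st j => (pvPos text j).foldl (pvStep (pvHit text j)) st)
        (([] : List String), (0 : Int), (0 : Int))).2.1
      = pvSum (fun e => e.2.1) pvWeights
          ((List.range k).foldl (fun st j => (pvPos text j).foldl (pvStep (pvHit text j)) st)
            (([] : List String), (0 : Int), (0 : Int))).1 ∧
    ((List.range k).foldl (fun st j => (pvPos text j).foldl (pvStep (pvHit text j)) st)
        (([] : List String), (0 : Int), (0 : Int))).2.2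
      = pvSum (fun e => e.2.2) pvWeights
          ((List.range k).foldl (fun st j => (pvPos text j).foldl (pvStep (pvHit text j)) st)
            (([] : List String), (0 : Int), (0 : Int))).1 := by
  induction k with
  | zero =>
    simp only [List.range_zero, List.foldl_nil]
    refine ⟨List.nodup_nil, ?_, (pvSum_nil _ _).symm, (pvSum_nil _ _).symm⟩
    intro y
    simp only [List.not_mem_nil, false_iff]
    rintro ⟨e, _, _, j, hj, _⟩
    exact absurd hj (Nat.not_lt_zero _)
  | succ k ih =>
    obtain ⟨h1, h2, h3, h4⟩ := ih
    rw [List.range_succ]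
    simp only [List.foldl_append, List.foldl_cons, List.foldl_nil]
    set R := (List.range k).foldl (fun st j => (pvPos text j).foldl (pvStep (pvHit text j)) st)
        (([] : List String), (0 : Int), (0 : Int)) with hR
    have G := pvInner (pvHit text k) (pvPos text k) List.filter_sublist
      R.1 R.2.1 R.2.2 h1 h3 h4
    rw [show (R.1, R.2.1, R.2.2) = R from rfl] at G
    obtain ⟨g1, g2, g3, g4⟩ := G
    refine ⟨g1, ?_, g3, g4⟩
    intro y
    rw [g2 y]
    constructor
    · rintro (hy | ⟨e, heP, rfl, hqe⟩)
      · obtain ⟨e, heW, rfl, j, hj, hb, hhit⟩ := (h2 y).mp hy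
        exact ⟨e, heW, rfl, j, Nat.lt_succ_of_lt hj, hb, hhit⟩
      · obtain ⟨heW, hb⟩ := List.mem_filter.mp heP
        exact ⟨e, heW, rfl, k, Nat.lt_succ_self _, hb, hqe⟩
    · rintro ⟨e, heW, rfl, j, hj, hb, hhit⟩
      rcases Nat.lt_succ_iff_lt_or_eq.mp hj with hjk | rfl
      · exact Or.inl ((h2 e.1).mpr ⟨e, heW, rfl, j, hjk, hb, hhit⟩)
      · exact Or.inr ⟨e, List.mem_filter.mpr ⟨heW, hb⟩, rfl, hhit⟩

lemma pvHit_iff (text : String) (j : Nat) (p : String) :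
    pvHit text j p = true ↔ p.toList <+: text.toList.drop j := by
  simp [pvHit, PySem.Chars.startswith_iff, PySem.List.slice_from_natCast]

lemma pvNonempty : ∀ e ∈ pvWeights, e.1.toList ≠ [] := by decide

lemma pvExists_hit_iff (text p : String) (hp : p.toList ≠ []) :
    (∃ j < text.toList.length,
        (pvHead p == pvCharAt text (j : Int)) = true ∧ pvHit text j p = true)
      ↔ PySem.Str.isIn p text = true := by
  rw [show (PySem.Str.isIn p text = true) ↔ PySem.Chars.isIn p.toList text.toList = true by
    simp]
  rw [← PySem.Chars.exists_prefix_drop_iff_isIn]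
  constructor
  · rintro ⟨j, _, _, hhit⟩
    exact ⟨j, (pvHit_iff text j p).mp hhit⟩
  · rintro ⟨j, hpre⟩
    obtain ⟨t, ht⟩ := hpre
    obtain ⟨c, cs, hc⟩ : ∃ c cs, p.toList = c :: cs := by
      cases hcl : p.toList with
      | nil => exact absurd hcl hp
      | cons c cs => exact ⟨c, cs, rfl⟩
    have hdropne : text.toList.drop j ≠ [] := by
      rw [← ht, hc]
      simp
    have hj : j < text.toList.length := by
      by_contra hge
      exact hdropne (List.drop_eq_nil_of_le (by omega))
    have hdrop : text.toList.drop j = text.toList[j] :: text.toList.drop (j + 1) :=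
      List.drop_eq_getElem_cons hj
    have hhead : text.toList[j] = c := by
      rw [hdrop, hc] at ht
      exact (List.cons.injEq _ _ _ _ ▸ congrArg id ht.symm).1
    refine ⟨j, hj, ?_, (pvHit_iff text j p).mpr ⟨t, ht⟩⟩
    have hcharAt : pvCharAt text (j : Int) = c := by
      simp only [pvCharAt, PySem.Str.pyGet?_natCast]
      rw [List.getElem?_eq_getElem hj, hhead]
      rfl
    rw [hcharAt, pvHead, hc]
    simp

lemma pvIte2 (c : Prop) [Decidable c] : (if c then (2:Int) else 0) = 2 * (if c then 1 else 0) := by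
  split_ifs <;> ring

lemma pvIte3 (c : Prop) [Decidable c] : (if c then (3:Int) else 0) = 3 * (if c then 1 else 0) := by
  split_ifs <;> ring

set_option maxHeartbeats 1000000 in
lemma pvScorePos (text : String) :
    (pvWeights.map (fun e => if PySem.Str.isIn e.1 text = true then e.2.1 else 0)).sum
      = (strongPositiveA.countP (fun w => PySem.Str.isIn w text) : Int) * 2
        + (moderatePositiveA.countP (fun w => PySem.Str.isIn w text) : Int) := by
  simp only [pvWeights, strongPositiveA, moderatePositiveA, List.map_cons, List.map_nil,
    List.sum_cons, List.sum_nil, List.countP_cons, List.countP_nil, ite_self]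
  simp only [pvIte2, pvIte3]
  push_cast [Nat.cast_ite]
  ring

set_option maxHeartbeats 1000000 in
lemma pvScoreNeg (text : String) :
    (pvWeights.map (fun e => if PySem.Str.isIn e.1 text = true then e.2.2 else 0)).sum
      = (strongNegativeA.countP (fun w => PySem.Str.isIn w text) : Int) * 2
        + (moderateNegativeA.countP (fun w => PySem.Str.isIn w text) : Int) := by
  simp only [pvWeights, strongNegativeA, moderateNegativeA, List.map_cons, List.map_nil,
    List.sum_cons, List.sum_nil, List.countP_cons, List.countP_nil, ite_self]
  simp only [pvIte2]
  push_cast [Nat.cast_ite]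
  ring


set_option maxHeartbeats 1000000 in
lemma pvFoldEq (text : String) :
    ((PySem.List.pyRange 0 (PySem.Str.len text) 1).foldl
      (fun st i =>
        (PySem.Dict.getD pvByFirst (pvCharAt text i) []).foldl
          (fun st e =>
            if !(PySem.Set.contains st.1 e.1)
                && PySem.Str.startswith (PySem.Str.slice text (some i) none) e.1 then
              (PySem.Set.add st.1 e.1, st.2.1 + e.2.1, st.2.2 + e.2.2)
            else st)
          st)
      (((PySem.Set.empty : PySem.Set String), (0 : Int), (0 : Int)))).2.1
      = (pvWeights.map (fun e => if PySem.Str.isIn e.1 text = true then e.2.1 else 0)).sum ∧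
    ((PySem.List.pyRange 0 (PySem.Str.len text) 1).foldl
      (fun st i =>
        (PySem.Dict.getD pvByFirst (pvCharAt text i) []).foldl
          (fun st e =>
            if !(PySem.Set.contains st.1 e.1)
                && PySem.Str.startswith (PySem.Str.slice text (some i) none) e.1 then
              (PySem.Set.add st.1 e.1, st.2.1 + e.2.1, st.2.2 + e.2.2)
            else st)
          st)
      (((PySem.Set.empty : PySem.Set String), (0 : Int), (0 : Int)))).2.2
      = (pvWeights.map (fun e => if PySem.Str.isIn e.1 text = true then e.2.2 else 0)).sum := by
  rw [PySem.List.pyRange_one]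
  rw [show (PySem.Str.len text - 0).toNat = text.toList.length from by
    simp [PySem.Str.len]]
  rw [List.foldl_map]
  simp only [zero_add, pvBucket]
  rw [show ((List.range text.toList.length).foldl
      (fun st (k : Nat) =>
        (pvWeights.filter (fun e => pvHead e.1 == pvCharAt text (k : Int))).foldl
          (fun st e =>
            if !(PySem.Set.contains st.1 e.1)
                && PySem.Str.startswith (PySem.Str.slice text (some (k : Int)) none) e.1 then
              (PySem.Set.add st.1 e.1, st.2.1 + e.2.1, st.2.2 + e.2.2)
            else st)
          st)
      (((PySem.Set.empty : PySem.Set String), (0 : Int), (0 : Int))))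
    = (List.range text.toList.length).foldl
      (fun st j => (pvPos text j).foldl (pvStep (pvHit text j)) st)
      (([] : List String), (0 : Int), (0 : Int)) from rfl]
  obtain ⟨h1, h2, h3, h4⟩ := pvOuter text text.toList.length
  have hmem : ∀ e ∈ pvWeights,
      (e.1 ∈ ((List.range text.toList.length).foldl
      (fun st j => (pvPos text j).foldl (pvStep (pvHit text j)) st)
      (([] : List String), (0 : Int), (0 : Int))).1) ↔ (PySem.Str.isIn e.1 text = true) := by
    intro e he
    rw [h2 e.1]
    constructor
    · rintro ⟨e', he', heq, j, hj, hb, hhit⟩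
      rw [← heq]
      exact (pvExists_hit_iff text e'.1 (pvNonempty e' he')).mp ⟨j, hj, hb, hhit⟩
    · intro hin
      obtain ⟨j, hj, hb, hhit⟩ := (pvExists_hit_iff text e.1 (pvNonempty e he)).mpr hin
      exact ⟨e, he, rfl, j, hj, hb, hhit⟩
  constructor
  · rw [h3]
    show (pvWeights.map (fun e => if e.1 ∈ ((List.range text.toList.length).foldl
      (fun st j => (pvPos text j).foldl (pvStep (pvHit text j)) st)
      (([] : List String), (0 : Int), (0 : Int))).1 then e.2.1 else 0)).sum = _
    rw [List.map_congr_left (fun e he => if_congr (hmem e he) rfl rfl)]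
  · rw [h4]
    show (pvWeights.map (fun e => if e.1 ∈ ((List.range text.toList.length).foldl
      (fun st j => (pvPos text j).foldl (pvStep (pvHit text j)) st)
      (([] : List String), (0 : Int), (0 : Int))).1 then e.2.2 else 0)).sum = _
    rw [List.map_congr_left (fun e he => if_congr (hmem e he) rfl rfl)]

-- ===== VERDICT (by name: the statement is the Claim_ definition above) =====
theorem analyze_price_impact_spec : Claim_equal_analyze_price_impact := by
  intro title summary _
  unfold Spec_analyze_price_impact
  simp only [analyze_price_impact, analyze_price_impact_alt]
  rw [(pvFoldEq (PySem.Str.lower (title ++ " " ++ summary))).1,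
      (pvFoldEq (PySem.Str.lower (title ++ " " ++ summary))).2,
      pvScorePos, pvScoreNeg]
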